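-- pv_equiv track=rewrite | github.com/AkariAsai/squad_code_bench | squad/corenlp_extractor.py | collect_constituency_dict
-- ===== SOURCE A (Python) =====
-- def collect_constituency_dict(const_str):
--     const = const_str.split(" ")
--     const_dictionary = {}
--
--     for i in range(len(const)):
--         if const[i][0] != "(":
--             const_tag = []
--             for j in range(1, i):
--                 if const[i - j][0] != "(" or i - j == 0:
--                     break
--                 else:
--                     const_tag.append(const[i - j][1:])
--             const_dictionary[const[i].replace(")", "")] = const_tag[::-1]
--     return const_dictionary
-- ===== SOURCE B (Python) =====
-- def collect_constituency_dict(const_str):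
--     # One forward pass with a running buffer of open-tag suffixes.
--     # The very first token never contributes a tag (A's backward scan stops
--     # before index 0), so it is handled before the loop.
--     tokens = const_str.split(" ")
--     const_dictionary = {}
--     head = tokens[0]
--     if head[0] != "(":
--         const_dictionary[head.replace(")", "")] = []
--     buffer = []
--     for tok in tokens[1:]:
--         if tok[0] == "(":
--             buffer.append(tok[1:])
--         else:
--             const_dictionary[tok.replace(")", "")] = buffer
--             buffer = []
--     return const_dictionary
-- ===== Notes on version B (the rewrite author's own statement) =====
-- stated objective: simpler
-- what changed: Replaces A's per-word backward rescan of the preceding run of open-paren tokens by a single forward pass that maintains a running buffer of open-tag suffixes, cleared at each word token.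
-- outside the precondition, e.g. on collect_constituency_dict(''): A raises IndexError, B raises IndexError
import Mathlib
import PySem

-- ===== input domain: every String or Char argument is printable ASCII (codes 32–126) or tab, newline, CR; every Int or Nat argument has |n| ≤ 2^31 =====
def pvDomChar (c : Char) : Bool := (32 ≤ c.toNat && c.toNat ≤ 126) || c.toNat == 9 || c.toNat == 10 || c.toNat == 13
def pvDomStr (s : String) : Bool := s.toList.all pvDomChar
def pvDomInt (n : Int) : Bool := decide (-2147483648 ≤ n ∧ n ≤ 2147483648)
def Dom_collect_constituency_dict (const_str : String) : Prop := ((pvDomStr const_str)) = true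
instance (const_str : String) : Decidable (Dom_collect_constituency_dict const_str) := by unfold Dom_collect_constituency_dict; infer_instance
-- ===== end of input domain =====

-- B replaces A's per-word backward rescan of the preceding '(' run by one forward pass with a running buffer.

-- s.split(" "): sep is the non-empty literal " ", so split? always returns some
def pvSplit (s : String) : List String := (PySem.Str.split? s " ").getD []

-- ===== PORT A =====
-- inner loop: for j in range(1, i): break on non-'(' first char (or index 0), else append const[i-j][1:]
def pvAInner (const : List String) (i : Nat) (j : Nat) (acc : List String) : List String :=
  if j < i then
    let t := const.getD (i - j) ""   -- i - j is always in range here (1 ≤ i - j < i ≤ const.length)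
    match PySem.Str.pyGet? t 0 with
    | none => acc                    -- Python raises IndexError on an empty token; excluded by Pre_
    | some c => if c ≠ '(' ∨ i - j = 0 then acc
                else pvAInner const i (j + 1) (acc ++ [PySem.Str.slice t (some 1) none])
  else acc
termination_by i - j

-- outer loop: for i in range(len(const))
def pvAOuter (const : List String) (i : Nat) (d : PySem.Dict String (List String)) :
    PySem.Dict String (List String) :=
  if i < const.length then
    let t := const.getD i ""
    match PySem.Str.pyGet? t 0 with
    | none => d                      -- Python raises IndexError on an empty token; excluded by Pre_
    | some c =>
      if c ≠ '(' then
        -- const_tag[::-1] is List.reverse (PySem.List.slice?_none_none_neg_one)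
        pvAOuter const (i + 1) (d.insert (PySem.Str.replace t ")" "") (pvAInner const i 1 []).reverse)
      else pvAOuter const (i + 1) d
  else d
termination_by const.length - i

def collect_constituency_dict (const_str : String) : List (String × List String) :=
  (pvAOuter (pvSplit const_str) 0 PySem.Dict.empty).items

-- ===== PORT B =====
-- forward pass: a '(' token pushes its suffix onto the buffer, a word token takes the buffer and clears it
def pvBLoop (toks : List String) (d : PySem.Dict String (List String)) (buf : List String) :
    PySem.Dict String (List String) :=
  match toks with
  | [] => d
  | t :: rest =>
    match PySem.Str.pyGet? t 0 with
    | none => d                      -- Python raises IndexError on an empty token; excluded by Pre_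
    | some c =>
      if c = '(' then pvBLoop rest d (buf ++ [PySem.Str.slice t (some 1) none])
      else pvBLoop rest (d.insert (PySem.Str.replace t ")" "") buf) []

def collect_constituency_dict_alt (const_str : String) : List (String × List String) :=
  match pvSplit const_str with
  | [] => []                         -- unreachable: str.split never returns an empty list
  | head :: rest =>
    let d0 := match PySem.Str.pyGet? head 0 with
      | none => PySem.Dict.empty     -- Python raises IndexError on an empty token; excluded by Pre_
      | some c => if c ≠ '(' then PySem.Dict.empty.insert (PySem.Str.replace head ")" "") ([] : List String)
                  else PySem.Dict.empty
    (pvBLoop rest d0 []).items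

-- ===== PRECONDITION & SPEC =====
-- Pre_ excludes exactly the inputs whose split contains an empty token (empty string, leading/trailing
-- space or two adjacent spaces): there Python A raises IndexError on token[0] (B raises there too).
def Pre_collect_constituency_dict (const_str : String) : Prop :=
  ∀ t ∈ pvSplit const_str, t ≠ ""
instance (const_str : String) : Decidable (Pre_collect_constituency_dict const_str) := by
  unfold Pre_collect_constituency_dict; infer_instance

def pvWitness_collect_constituency_dict : String := "(S (NP the) dog)"

def Spec_collect_constituency_dict (const_str : String) (out : List (String × List String)) : Prop := out = collect_constituency_dict_alt const_str
instance (const_str : String) (out : List (String × List String)) : Decidable (Spec_collect_constituency_dict const_str out) := by unfold Spec_collect_constituency_dict; infer_instance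

-- ===== CLAIM (what is proved, stated in full; the proofs are below) =====
def Claim_equal_collect_constituency_dict : Prop := ∀ (const_str : String), Dom_collect_constituency_dict const_str → Pre_collect_constituency_dict const_str → Spec_collect_constituency_dict const_str (collect_constituency_dict const_str)

-- ===== LEMMAS AND PROOFS =====

def pvIsOpen (t : String) : Bool := PySem.Str.pyGet? t 0 == some '('

-- A's backward scan, indexed directly by the position scanned (m, m-1, …, 1)
def pvAScan (const : List String) : Nat → List String
  | 0 => []
  | m + 1 =>
    if pvIsOpen (const.getD (m + 1) "") then
      PySem.Str.slice (const.getD (m + 1) "") (some 1) none :: pvAScan const m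
    else []

-- B's buffer just before processing index i (index 0 never contributes)
def pvBufAt (const : List String) : Nat → List String
  | 0 => []
  | 1 => []
  | m + 2 =>
    if pvIsOpen (const.getD (m + 1) "") then
      pvBufAt const (m + 1) ++ [PySem.Str.slice (const.getD (m + 1) "") (some 1) none]
    else []

theorem pvGet0 (t : String) (h : t ≠ "") :
    ∃ c, PySem.Str.pyGet? t 0 = some c ∧ pvIsOpen t = (c == '(') := by
  have hnil : t.toList ≠ [] := fun hn => h (String.toList_eq_nil_iff.mp hn)
  have h0 : PySem.Str.pyGet? t 0 = t.toList[0]? := by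
    simp [PySem.List.pyGet?_zero]
  cases hl : t.toList with
  | nil => exact absurd hl hnil
  | cons a l =>
    refine ⟨a, ?_, ?_⟩
    · rw [h0, hl]; rfl
    · simp [pvIsOpen, hl]

theorem pvAInner_eq_aScan (const : List String) (hne : ∀ t ∈ const, t ≠ "")
    (i : Nat) (hi : i ≤ const.length) :
    ∀ j acc, 1 ≤ j → pvAInner const i j acc = acc ++ pvAScan const (i - j) := by
  have key : ∀ n j acc, i - j = n → 1 ≤ j →
      pvAInner const i j acc = acc ++ pvAScan const (i - j) := by
    intro n
    induction n with
    | zero =>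
      intro j acc hn hj
      have hji : ¬ j < i := by omega
      rw [pvAInner.eq_def, if_neg hji, hn]
      simp [pvAScan]
    | succ n IHn =>
      intro j acc hn hj
      have hji : j < i := by omega
      have hidx : i - j < const.length := by omega
      have hgd : const.getD (i - j) "" ∈ const := by
        rw [List.getD_eq_getElem const "" hidx]; exact List.getElem_mem hidx
      obtain ⟨c, hc, hopen⟩ := pvGet0 _ (hne _ hgd)
      rw [pvAInner.eq_def, if_pos hji]
      simp only [hc]
      have hij : i - j = (i - (j + 1)) + 1 := by omega
      by_cases hcp : c = '('
      · have hcond : ¬ (c ≠ '(' ∨ i - j = 0) := by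
          rintro (h1 | h2)
          · exact h1 hcp
          · omega
        rw [if_neg hcond]
        have hrec := IHn (j + 1) (acc ++ [PySem.Str.slice (const.getD (i - j) "") (some 1) none])
          (by omega) (by omega)
        rw [hrec]
        have hpos : pvIsOpen (const.getD (i - j) "") = true := by rw [hopen, hcp]; rfl
        have hsc : pvAScan const (i - j) =
            PySem.Str.slice (const.getD (i - j) "") (some 1) none :: pvAScan const (i - (j + 1)) := by
          rw [hij, pvAScan, ← hij, if_pos hpos]
        rw [hsc]
        simp
      · rw [if_pos (Or.inl hcp)]
        have hneg : ¬ (pvIsOpen (const.getD (i - j) "") = true) := by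
          rw [hopen]; simp [hcp]
        have hsc0 : pvAScan const (i - j) = [] := by
          rw [hij, pvAScan, ← hij, if_neg hneg]
        rw [hsc0]
        simp
  intro j acc hj
  exact key (i - j) j acc rfl hj

theorem pvAScan_reverse (const : List String) (m : Nat) :
    (pvAScan const m).reverse = pvBufAt const (m + 1) := by
  induction m with
  | zero => simp [pvAScan, pvBufAt]
  | succ m ih =>
    rw [pvAScan]
    show _ = pvBufAt const (m + 2)
    rw [pvBufAt]
    split_ifs with h
    · simp [ih]
    · simp

theorem pvMain (const : List String) (hne : ∀ t ∈ const, t ≠ "") :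
    ∀ i d, 1 ≤ i → pvAOuter const i d = pvBLoop (const.drop i) d (pvBufAt const i) := by
  have key : ∀ n i d, const.length - i = n → 1 ≤ i →
      pvAOuter const i d = pvBLoop (const.drop i) d (pvBufAt const i) := by
    intro n
    induction n with
    | zero =>
      intro i d hn _
      have hge : const.length ≤ i := by omega
      rw [pvAOuter.eq_def, if_neg (by omega), List.drop_eq_nil_of_le hge, pvBLoop]
    | succ n IH =>
      intro i d hn hi
      have hlt : i < const.length := by omega
      have hdrop : const.drop i = const[i] :: const.drop (i + 1) :=
        List.drop_eq_getElem_cons hlt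
      have hgetD : const.getD i "" = const[i] := List.getD_eq_getElem const "" hlt
      obtain ⟨c, hc, hopen⟩ := pvGet0 _ (hne _ (List.getElem_mem hlt))
      rw [pvAOuter.eq_def, if_pos hlt, hdrop]
      simp only [hgetD, hc, pvBLoop]
      obtain ⟨m, rfl⟩ : ∃ m, i = m + 1 := ⟨i - 1, by omega⟩
      by_cases hcp : c = '('
      · rw [if_neg (by simp [hcp]), if_pos hcp]
        have hbuf : pvBufAt const (m + 2) =
            pvBufAt const (m + 1) ++ [PySem.Str.slice const[m + 1] (some 1) none] := by
          rw [pvBufAt, if_pos (by rw [hgetD, hopen, hcp]; rfl), hgetD]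
        rw [← hbuf]
        exact IH (m + 2) d (by omega) (by omega)
      · rw [if_pos hcp, if_neg hcp]
        have hinner : (pvAInner const (m + 1) 1 []).reverse = pvBufAt const (m + 1) := by
          rw [pvAInner_eq_aScan const hne (m + 1) (by omega) 1 [] (by omega)]
          simpa using pvAScan_reverse const m
        have hbuf : pvBufAt const (m + 2) = [] := by
          rw [pvBufAt, if_neg (by rw [hgetD, hopen]; simp [hcp])]
        rw [hinner, ← hbuf]
        exact IH (m + 2) _ (by omega) (by omega)
  intro i d hi
  exact key (const.length - i) i d rfl hi

-- ===== VERDICT (by name: the statement is the Claim_ definition above) =====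
theorem collect_constituency_dict_spec : Claim_equal_collect_constituency_dict := by
  intro s _ hpre
  unfold Spec_collect_constituency_dict collect_constituency_dict collect_constituency_dict_alt
  have hne : ∀ t ∈ pvSplit s, t ≠ "" := hpre
  cases hcs : pvSplit s with
  | nil => rw [pvAOuter.eq_def]; simp; rfl
  | cons head rest =>
    have hh : head ≠ "" := hne head (by rw [hcs]; exact List.mem_cons_self ..)
    have hne' : ∀ t ∈ head :: rest, t ≠ "" := by rw [← hcs]; exact hne
    obtain ⟨c, hc, _⟩ := pvGet0 head hh
    have hmain := fun d => pvMain (head :: rest) hne' 1 d (by omega)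
    rw [pvAOuter.eq_def]
    simp only [hc, List.length_cons, List.getD_cons_zero]
    rw [if_pos (by omega)]
    by_cases hcp : c = '('
    · rw [if_neg (by simp [hcp]), hmain]
      simp [pvBufAt, hcp]
    · rw [if_pos hcp, hmain]
      have : pvAInner (head :: rest) 0 1 [] = [] := by
        rw [pvAInner.eq_def]; simp
      simp [pvBufAt, this, hcp]
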